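-- pv_equiv track=rewrite | github.com/Username-ejg-not-available/eecs510-functions | Paths.py | isAntiSymm
-- ===== SOURCE A (Python) =====
-- def isAntiSymm(matrix):
--     for x in range(0, len(matrix)):
--         for y in range(0, len(matrix)):
--             if x == y:
--                 continue
--             if matrix[x][y] and matrix[y][x]:
--                 return 0
--     return 1
-- ===== SOURCE B (Python) =====
-- def isAntiSymm(matrix):
--     edges = {(x, y) for x, row in enumerate(matrix) for y, v in enumerate(row) if v}
--     for (x, y) in edges:
--         if x != y and (y, x) in edges:
--             return 0
--     return 1
-- ===== Notes on version B (the rewrite author's own statement) =====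
-- stated objective: alternative
-- what changed: Replaces A's nested index rescans of the matrix with a build-then-lookup traversal: one enumerate sweep collects the set of truthy (row, column) positions, then a single scan over that edge set tests reverse membership.
import Mathlib
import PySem

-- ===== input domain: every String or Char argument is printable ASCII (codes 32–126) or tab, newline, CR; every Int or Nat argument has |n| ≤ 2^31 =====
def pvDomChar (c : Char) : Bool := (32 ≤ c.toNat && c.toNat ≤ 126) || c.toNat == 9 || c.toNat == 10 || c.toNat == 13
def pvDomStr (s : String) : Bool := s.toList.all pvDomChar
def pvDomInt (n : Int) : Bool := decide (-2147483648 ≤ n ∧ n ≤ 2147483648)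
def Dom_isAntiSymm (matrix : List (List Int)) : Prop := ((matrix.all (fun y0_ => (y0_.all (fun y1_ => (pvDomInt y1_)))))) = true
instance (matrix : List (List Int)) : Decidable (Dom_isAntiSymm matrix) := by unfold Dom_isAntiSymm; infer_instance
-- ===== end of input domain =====

-- B builds the set of truthy positions in one sweep over the rows that actually exist
-- (enumerate, no indexing) and then scans that set with reverse-membership lookups,
-- instead of A's nested index rescans; equivalence is on the return value.

-- matrix[x][y] via Python indexing with defaults ([] / 0); exact wherever A's accesses are in range
def pvEntry (matrix : List (List Int)) (x y : Int) : Int :=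
  PySem.List.pyGetD (PySem.List.pyGetD matrix x []) y 0

-- row x of the matrix (Nat index, [] when out of range) — used by Pre_ and the lemmas
def pvRow (matrix : List (List Int)) (x : Nat) : List Int := matrix.getD x []

-- ===== PORT A =====
-- A: nested loops over range(len(matrix)); early 'return 0' ported as 'any'
def isAntiSymm (matrix : List (List Int)) : Int :=
  if (PySem.List.pyRange 0 matrix.length 1).any (fun x =>
       (PySem.List.pyRange 0 matrix.length 1).any (fun y =>
         if x == y then false
         else decide (pvEntry matrix x y ≠ 0) && decide (pvEntry matrix y x ≠ 0)))
  then 0 else 1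

-- ===== PORT B =====
-- B: build the set of truthy (row, column) positions from the existing entries, then
-- scan the set testing reverse membership
def isAntiSymm_alt (matrix : List (List Int)) : Int :=
  let edges : PySem.Set (Int × Int) :=
    (PySem.List.enumerate matrix).foldl (fun s xr =>
      (PySem.List.enumerate xr.2).foldl (fun s yv =>
        if yv.2 ≠ 0 then PySem.Set.add s (xr.1, yv.1) else s) s)
      PySem.Set.empty
  if edges.any (fun p => p.1 != p.2 && PySem.Set.contains edges (p.2, p.1))
  then 0 else 1

-- ===== PRECONDITION & SPEC =====
-- Pre_ is exactly the set of inputs on which Python A returns (A raises IndexError on the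
-- other, ragged inputs): either every off-diagonal access of the full scan is in range, or
-- some in-range symmetric pair of truthy entries exists whose scan-order-earlier accesses
-- (lexicographic (x, y), with the short-circuited reverse access) are all in range, so A
-- returns 0 before reaching a short row.
def pvFullScanOK (matrix : List (List Int)) : Bool :=
  (List.range matrix.length).all fun x => (List.range matrix.length).all fun y =>
    x == y || decide (y < (pvRow matrix x).length)
def pvEarlyHit (matrix : List (List Int)) : Bool :=
  (List.range matrix.length).any fun x => (List.range matrix.length).any fun y =>
    x != y && decide (y < (pvRow matrix x).length) && decide (x < (pvRow matrix y).length)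
    && ((pvRow matrix x).getD y 0 != 0) && ((pvRow matrix y).getD x 0 != 0)
    && ((List.range matrix.length).all fun u => (List.range matrix.length).all fun v =>
         !(u != v && (decide (u < x) || (u == x && decide (v < y)))) ||
         (decide (v < (pvRow matrix u).length) &&
           (!((pvRow matrix u).getD v 0 != 0) || decide (u < (pvRow matrix v).length))))
def Pre_isAntiSymm (matrix : List (List Int)) : Prop :=
  (pvFullScanOK matrix || pvEarlyHit matrix) = true
instance (matrix : List (List Int)) : Decidable (Pre_isAntiSymm matrix) := by
  unfold Pre_isAntiSymm; infer_instance
def pvWitness_isAntiSymm : List (List Int) := [[0, 1], [0, 0]]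
def Spec_isAntiSymm (matrix : List (List Int)) (out : Int) : Prop := out = isAntiSymm_alt matrix
instance (matrix : List (List Int)) (out : Int) : Decidable (Spec_isAntiSymm matrix out) := by
  unfold Spec_isAntiSymm; infer_instance

-- ===== CLAIM (what is proved, stated in full; the proofs are below) =====
def Claim_equal_isAntiSymm : Prop := ∀ (matrix : List (List Int)), Dom_isAntiSymm matrix → Pre_isAntiSymm matrix → Spec_isAntiSymm matrix (isAntiSymm matrix)

-- ===== LEMMAS AND PROOFS =====

-- membership in a fold that conditionally adds g y to a PySem.Set
theorem mem_foldl_addIf {α β : Type} [BEq α] [LawfulBEq α]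
    (l : List β) (g : β → α) (f : β → Prop) [DecidablePred f] (s : List α) (p : α) :
    p ∈ l.foldl (fun s y => if f y then PySem.Set.add s (g y) else s) s ↔
      p ∈ s ∨ ∃ y ∈ l, f y ∧ p = g y := by
  induction l generalizing s with
  | nil => simp
  | cons a t ih =>
    simp only [List.foldl_cons, ih]
    constructor
    · rintro (h | ⟨y, hy, hf, rfl⟩)
      · split at h
        · rcases (PySem.Set.mem_add _ _ _).1 h with h | h
          · exact Or.inl h
          · exact Or.inr ⟨a, by simp, by simp_all⟩
        · exact Or.inl h
      · exact Or.inr ⟨y, by simp [hy], hf, rfl⟩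
    · rintro (h | ⟨y, hy, hf, rfl⟩)
      · refine Or.inl ?_
        split
        · exact (PySem.Set.mem_add _ _ _).2 (Or.inl h)
        · exact h
      · rcases List.mem_cons.1 hy with rfl | hy
        · exact Or.inl (by simp [hf, PySem.Set.mem_add])
        · exact Or.inr ⟨y, hy, hf, rfl⟩

-- B's edge set contains p iff p = (k, j) for an existing truthy entry matrix[k][j]
theorem mem_edges (matrix : List (List Int)) (p : Int × Int) :
    p ∈ (PySem.List.enumerate matrix).foldl (fun s xr =>
        (PySem.List.enumerate xr.2).foldl (fun s yv =>
          if yv.2 ≠ 0 then PySem.Set.add s (xr.1, yv.1) else s) s)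
        (PySem.Set.empty (α := Int × Int)) ↔
      ∃ k : Nat, k < matrix.length ∧ ∃ j : Nat, j < (pvRow matrix k).length ∧
        (pvRow matrix k).getD j 0 ≠ 0 ∧ p = ((k : Int), (j : Int)) := by
  have key : ∀ (l : List (Int × List Int)) (s : List (Int × Int)),
      p ∈ l.foldl (fun s xr =>
        (PySem.List.enumerate xr.2).foldl (fun s yv =>
          if yv.2 ≠ 0 then PySem.Set.add s (xr.1, yv.1) else s) s) s ↔
      p ∈ s ∨ ∃ xr ∈ l, ∃ yv ∈ PySem.List.enumerate xr.2, yv.2 ≠ 0 ∧ p = (xr.1, yv.1) := by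
    intro l
    induction l with
    | nil => simp
    | cons a t ih =>
      intro s
      simp only [List.foldl_cons, ih]
      rw [mem_foldl_addIf (PySem.List.enumerate a.2) (fun yv => (a.1, yv.1)) (fun yv => yv.2 ≠ 0)]
      constructor
      · rintro ((h | ⟨yv, hyv, hf, rfl⟩) | ⟨xr, hxr, yv, hyv, hf, rfl⟩)
        · exact Or.inl h
        · exact Or.inr ⟨a, by simp, yv, hyv, hf, rfl⟩
        · exact Or.inr ⟨xr, by simp [hxr], yv, hyv, hf, rfl⟩
      · rintro (h | ⟨xr, hxr, yv, hyv, hf, rfl⟩)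
        · exact Or.inl (Or.inl h)
        · rcases List.mem_cons.1 hxr with rfl | hxr
          · exact Or.inl (Or.inr ⟨yv, hyv, hf, rfl⟩)
          · exact Or.inr ⟨xr, hxr, yv, hyv, hf, rfl⟩
  rw [key]
  have hrowk : ∀ k, (hk : k < matrix.length) → pvRow matrix k = matrix[k] := by
    intro k hk
    rw [pvRow, List.getD_eq_getElem?_getD, List.getElem?_eq_getElem hk]
    rfl
  simp only [PySem.Set.empty, List.not_mem_nil, false_or]
  constructor
  · rintro ⟨⟨x, row⟩, hrow, ⟨y, v⟩, hv, hne, rfl⟩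
    obtain ⟨k, hk, hpk⟩ := (PySem.List.mem_enumerate_iff _ _ _).1 hrow
    obtain ⟨j, hj, hpj⟩ := (PySem.List.mem_enumerate_iff _ _ _).1 hv
    simp only [Prod.mk.injEq] at hpk hpj
    have hrow' : pvRow matrix k = row := by rw [hrowk k hk, ← hpk.2]
    have hj' : j < row.length := hj
    have hv' : row.getD j 0 = v := by
      rw [List.getD_eq_getElem?_getD, List.getElem?_eq_getElem hj', Option.getD_some, hpj.2]
    refine ⟨k, hk, j, by rw [hrow']; exact hj, by rw [hrow', hv']; exact hne, ?_⟩
    simp [hpk.1, hpj.1]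
  · rintro ⟨k, hk, j, hj, hne, rfl⟩
    rw [hrowk k hk] at hj hne
    refine ⟨((k : Int), matrix[k]), ?_, ((j : Int), matrix[k][j]), ?_, ?_, rfl⟩
    · exact (PySem.List.mem_enumerate_iff _ _ _).2 ⟨k, hk, by simp⟩
    · exact (PySem.List.mem_enumerate_iff _ _ _).2 ⟨j, hj, by simp⟩
    · rw [List.getD_eq_getElem?_getD, List.getElem?_eq_getElem hj] at hne
      simpa using hne

-- pvEntry at nonnegative cast indices is the plain getD entry
theorem pvEntry_natCast (matrix : List (List Int)) (k j : Nat) :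
    pvEntry matrix (k : Int) (j : Int) = (pvRow matrix k).getD j 0 := by
  simp [pvEntry, pvRow, PySem.List.pyGetD_natCast]

-- a truthy getD entry must be in range (the default is 0)
theorem getD_ne_zero_lt (row : List Int) (j : Nat) (h : row.getD j 0 ≠ 0) :
    j < row.length := by
  by_contra hge
  rw [List.getD_eq_getElem?_getD, List.getElem?_eq_none (by omega)] at h
  simp at h

-- the two ports agree on every input (B's default-0 reads make raggedness harmless:
-- a truthy entry is necessarily an existing one)
theorem isAntiSymm_eq (matrix : List (List Int)) :
    isAntiSymm matrix = isAntiSymm_alt matrix := by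
  unfold isAntiSymm isAntiSymm_alt
  have hcond :
      ((PySem.List.pyRange 0 matrix.length 1).any (fun x =>
        (PySem.List.pyRange 0 matrix.length 1).any (fun y =>
          if x == y then false
          else decide (pvEntry matrix x y ≠ 0) && decide (pvEntry matrix y x ≠ 0)))) =
      (((PySem.List.enumerate matrix).foldl (fun s xr =>
          (PySem.List.enumerate xr.2).foldl (fun s yv =>
            if yv.2 ≠ 0 then PySem.Set.add s (xr.1, yv.1) else s) s)
          (PySem.Set.empty (α := Int × Int))).any
        (fun p => p.1 != p.2 && PySem.Set.contains
          ((PySem.List.enumerate matrix).foldl (fun s xr =>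
            (PySem.List.enumerate xr.2).foldl (fun s yv =>
              if yv.2 ≠ 0 then PySem.Set.add s (xr.1, yv.1) else s) s)
            (PySem.Set.empty (α := Int × Int))) (p.2, p.1))) := by
    rw [Bool.eq_iff_iff]
    simp only [List.any_eq_true, PySem.Set.contains, List.contains_eq_mem,
      Bool.and_eq_true, bne_iff_ne, decide_eq_true_eq, PySem.List.mem_pyRange_one]
    constructor
    · rintro ⟨x, ⟨hx0, hxn⟩, y, ⟨hy0, hyn⟩, h⟩
      by_cases hxy : x = y
      · simp [hxy] at h
      · simp only [beq_iff_eq, hxy, if_false, Bool.and_eq_true, decide_eq_true_eq] at h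
        obtain ⟨hfwd, hrev⟩ := h
        obtain ⟨k, rfl⟩ : ∃ k : Nat, x = (k : Int) := ⟨x.toNat, (Int.toNat_of_nonneg hx0).symm⟩
        obtain ⟨j, rfl⟩ : ∃ j : Nat, y = (j : Int) := ⟨y.toNat, (Int.toNat_of_nonneg hy0).symm⟩
        rw [pvEntry_natCast] at hfwd hrev
        have hk : k < matrix.length := by exact_mod_cast hxn
        have hj : j < matrix.length := by exact_mod_cast hyn
        refine ⟨((k : Int), (j : Int)),
          (mem_edges matrix _).2 ⟨k, hk, j, getD_ne_zero_lt _ _ hfwd, hfwd, rfl⟩, hxy, ?_⟩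
        exact (mem_edges matrix _).2 ⟨j, hj, k, getD_ne_zero_lt _ _ hrev, hrev, rfl⟩
    · rintro ⟨p, hp, hne, hrev⟩
      obtain ⟨k, hk, j, hjlen, hkj, hpkj⟩ := (mem_edges matrix p).1 hp
      obtain ⟨k', hk', j', hjlen', hkj', hpkj'⟩ := (mem_edges matrix (p.2, p.1)).1 hrev
      rw [hpkj] at hpkj' hne
      simp only [Prod.mk.injEq] at hpkj'
      obtain ⟨h1, h2⟩ := hpkj'
      have hjk' : j = k' := by exact_mod_cast h1
      refine ⟨(k : Int), ⟨by positivity, by exact_mod_cast hk⟩,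
        (j : Int), ⟨by positivity, by exact_mod_cast hjk' ▸ hk'⟩, ?_⟩
      have hxy : ((k : Int) == (j : Int)) = false := by
        simpa using hne
      rw [hxy]
      simp only [Bool.false_eq_true, if_false, Bool.and_eq_true, decide_eq_true_eq]
      constructor
      · rw [pvEntry_natCast]; exact hkj
      · rw [pvEntry_natCast]
        have hkj2 : k = j' := by exact_mod_cast h2
        rw [hjk', hkj2]; exact hkj'
  rw [hcond]

-- ===== VERDICT (by name: the statement is the Claim_ definition above) =====
theorem isAntiSymm_spec : Claim_equal_isAntiSymm := by
  intro matrix _ _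
  unfold Spec_isAntiSymm
  exact isAntiSymm_eq matrix
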